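-- pv_equiv track=rewrite | github.com/LLIekspear/ScannerCVZ | app/src/main/python/script.py | get_bitDFT
-- ===== SOURCE A (Python) =====
-- def abs_diff_coefsDFT(a, b):
--     return abs(a)-abs(b)
--
-- def get_bitDFT(block, threshold):
--     allDiffs=[]
--     for i in range(len(block)):
--         for j in range(len(block)):
--             allDiffs.append(abs_diff_coefsDFT(block[i], block[j]))
--     if(max(allDiffs)>threshold):
--         return 1
--     else:
--         return 0
-- ===== SOURCE B (Python) =====
-- def get_bitDFT(block, threshold):
--     it = iter(block)
--     hi = lo = abs(next(it))
--     for x in it: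
--         a = abs(x)
--         if a > hi:
--             hi = a
--         if a < lo:
--             lo = a
--     return 1 if hi - lo > threshold else 0
-- ===== Notes on version B (the rewrite author's own statement) =====
-- stated objective: faster
-- what changed: Replaced the O(n^2) materialisation of all pairwise |a|-|b| differences with a single pass tracking max(|x|) and min(|x|), since the maximal pairwise difference is exactly max|x|-min|x|.
import Mathlib
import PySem

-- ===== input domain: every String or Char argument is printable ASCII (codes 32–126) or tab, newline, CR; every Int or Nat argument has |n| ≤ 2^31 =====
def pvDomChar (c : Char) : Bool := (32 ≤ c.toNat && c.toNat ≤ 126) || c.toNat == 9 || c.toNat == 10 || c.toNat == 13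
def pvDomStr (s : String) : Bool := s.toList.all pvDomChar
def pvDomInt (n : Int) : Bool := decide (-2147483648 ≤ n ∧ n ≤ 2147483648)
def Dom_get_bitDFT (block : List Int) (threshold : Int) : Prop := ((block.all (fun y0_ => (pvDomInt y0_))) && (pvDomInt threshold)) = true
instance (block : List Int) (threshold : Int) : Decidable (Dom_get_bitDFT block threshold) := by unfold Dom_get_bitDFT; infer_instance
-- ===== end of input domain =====

-- B replaces A's O(n^2) list of all pairwise |a|-|b| differences by a single pass
-- tracking max(|x|) and min(|x|) (the maximal pairwise difference is max|x|-min|x|): asymptotically faster.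

-- ===== PORT A =====
def abs_diff_coefsDFT (a b : Int) : Int := |a| - |b|

def get_bitDFT (block : List Int) (threshold : Int) : Int :=
  -- allDiffs built by the two nested index loops, appending one diff at a time
  let allDiffs : List Int :=
    (PySem.List.pyRange 0 (block.length : Int) 1).foldl (fun acc i =>
      (PySem.List.pyRange 0 (block.length : Int) 1).foldl (fun acc2 j =>
        acc2 ++ [abs_diff_coefsDFT (PySem.List.pyGetD block i 0) (PySem.List.pyGetD block j 0)]) acc) []
  -- max(allDiffs): Python raises ValueError on empty (excluded by Pre_)
  match PySem.List.max? allDiffs (fun y => y) with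
  | some m => if m > threshold then 1 else 0
  | none => 0

-- ===== PORT B =====
def get_bitDFT_alt (block : List Int) (threshold : Int) : Int :=
  match block with
  | [] => 0   -- Python B raises StopIteration here (excluded by Pre_)
  | x :: t =>
    let hl := t.foldl (fun (p : Int × Int) y =>
      let a := |y|
      (if a > p.1 then a else p.1, if a < p.2 then a else p.2)) (|x|, |x|)
    if hl.1 - hl.2 > threshold then 1 else 0

-- ===== PRECONDITION & SPEC =====
-- Both Pythons raise on an empty block (ValueError from max([]) in A, StopIteration in B).
def Pre_get_bitDFT (block : List Int) (threshold : Int) : Prop := block ≠ []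
instance (block : List Int) (threshold : Int) : Decidable (Pre_get_bitDFT block threshold) := by unfold Pre_get_bitDFT; infer_instance
def pvWitness_get_bitDFT : List Int × Int := ([3, -1, 4], 2)

def Spec_get_bitDFT (block : List Int) (threshold : Int) (out : Int) : Prop := out = get_bitDFT_alt block threshold
instance (block : List Int) (threshold : Int) (out : Int) : Decidable (Spec_get_bitDFT block threshold out) := by unfold Spec_get_bitDFT; infer_instance

-- ===== CLAIM (what is proved, stated in full; the proofs are below) =====
def Claim_equal_get_bitDFT : Prop := ∀ (block : List Int) (threshold : Int), Dom_get_bitDFT block threshold → Pre_get_bitDFT block threshold → Spec_get_bitDFT block threshold (get_bitDFT block threshold)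

-- ===== LEMMAS AND PROOFS =====

-- the fold-with-ifs of B computes the pair (running max of |·|, running min of |·|)
theorem bfold_eq_max_min (t : List Int) (h l : Int) :
    t.foldl (fun (p : Int × Int) y =>
      let a := |y|
      (if a > p.1 then a else p.1, if a < p.2 then a else p.2)) (h, l)
    = (t.foldl (fun m y => max m |y|) h, t.foldl (fun m y => min m |y|) l) := by
  induction t generalizing h l with
  | nil => rfl
  | cons y t ih =>
    simp only [List.foldl_cons]
    rw [ih]
    congr 1
    · rcases lt_or_ge h |y| with h1 | h1
      · simp [max_eq_right h1.le, h1]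
      · simp [max_eq_left h1, not_lt.2 h1]
    · rcases lt_or_ge |y| l with h1 | h1
      · simp [min_eq_right h1.le, h1]
      · simp [min_eq_left h1, not_lt.2 h1]

-- allDiffs as built by A's nested index loops is the flatMap of all pairwise diffs
theorem allDiffs_eq (block : List Int) :
    (PySem.List.pyRange 0 (block.length : Int) 1).foldl (fun acc i =>
      (PySem.List.pyRange 0 (block.length : Int) 1).foldl (fun acc2 j =>
        acc2 ++ [abs_diff_coefsDFT (PySem.List.pyGetD block i 0) (PySem.List.pyGetD block j 0)]) acc) []
    = block.flatMap (fun a => block.map (fun b => |a| - |b|)) := by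
  have hinner : ∀ (acc : List Int) (i : Int),
      (PySem.List.pyRange 0 (block.length : Int) 1).foldl (fun acc2 j =>
        acc2 ++ [abs_diff_coefsDFT (PySem.List.pyGetD block i 0) (PySem.List.pyGetD block j 0)]) acc
      = acc ++ block.map (fun b => |PySem.List.pyGetD block i 0| - |b|) := by
    intro acc i
    rw [PySem.List.foldl_append_singleton_eq_map]
    congr 1
    have := PySem.List.map_pyGetD_pyRange_zero' (xs := block) (d := (0 : Int))
    calc (PySem.List.pyRange 0 (block.length : Int) 1).map
            (fun j => abs_diff_coefsDFT (PySem.List.pyGetD block i 0) (PySem.List.pyGetD block j 0))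
        = ((PySem.List.pyRange 0 (block.length : Int) 1).map
            (fun j => PySem.List.pyGetD block j 0)).map
            (fun b => abs_diff_coefsDFT (PySem.List.pyGetD block i 0) b) := by
          rw [List.map_map]; rfl
      _ = block.map (fun b => |PySem.List.pyGetD block i 0| - |b|) := by
          rw [this]; rfl
  calc (PySem.List.pyRange 0 (block.length : Int) 1).foldl (fun acc i =>
        (PySem.List.pyRange 0 (block.length : Int) 1).foldl (fun acc2 j =>
          acc2 ++ [abs_diff_coefsDFT (PySem.List.pyGetD block i 0) (PySem.List.pyGetD block j 0)]) acc) []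
      = (PySem.List.pyRange 0 (block.length : Int) 1).foldl (fun acc i =>
          acc ++ block.map (fun b => |PySem.List.pyGetD block i 0| - |b|)) [] := by
        apply PySem.List.foldl_congr_mem
        intro acc i _
        exact hinner acc i
    _ = (PySem.List.pyRange 0 (block.length : Int) 1).flatMap
          (fun i => block.map (fun b => |PySem.List.pyGetD block i 0| - |b|)) := by
        rw [PySem.List.foldl_append_eq_flatMap]; rfl
    _ = ((PySem.List.pyRange 0 (block.length : Int) 1).map
          (fun i => PySem.List.pyGetD block i 0)).flatMap
          (fun a => block.map (fun b => |a| - |b|)) := by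
        rw [List.flatMap_map]
    _ = block.flatMap (fun a => block.map (fun b => |a| - |b|)) := by
        rw [PySem.List.map_pyGetD_pyRange_zero']

-- max of the flatMap of all pairwise diffs = (running max of |·|) - (running min of |·|)
theorem max_flatMap (x : Int) (t : List Int) :
    PySem.List.max? ((x :: t).flatMap (fun a => (x :: t).map (fun b => |a| - |b|))) (fun y => y)
    = some ((t.foldl (fun m y => max m |y|) |x|) - (t.foldl (fun m y => min m |y|) |x|)) := by
  set l : List Int := x :: t with hl
  set M : Int := t.foldl (fun m y => max m |y|) |x| with hM
  set m0 : Int := t.foldl (fun m y => min m |y|) |x| with hm0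
  set D : List Int := l.flatMap (fun a => l.map (fun b => |a| - |b|)) with hD
  -- rewrite the folds as folds over t.map abs
  have hMf : M = (t.map (fun y => |y|)).foldl max |x| := by rw [hM, List.foldl_map]
  have hmf : m0 = (t.map (fun y => |y|)).foldl min |x| := by rw [hm0, List.foldl_map]
  -- M is attained by some a ∈ l
  have hMmem : ∃ a ∈ l, |a| = M := by
    rcases PySem.List.foldl_max_mem (t.map (fun y => |y|)) |x| with h | h
    · exact ⟨x, by simp [hl], by rw [hMf, h]⟩
    · rcases List.mem_map.1 (hMf ▸ h) with ⟨a, ha, hae⟩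
      exact ⟨a, by simp [hl, ha], hae⟩
  have hmmem : ∃ b ∈ l, |b| = m0 := by
    rcases PySem.List.foldl_min_mem (t.map (fun y => |y|)) |x| with h | h
    · exact ⟨x, by simp [hl], by rw [hmf, h]⟩
    · rcases List.mem_map.1 (hmf ▸ h) with ⟨b, hb, hbe⟩
      exact ⟨b, by simp [hl, hb], hbe⟩
  -- bounds: every |a| ≤ M, m0 ≤ |b|
  have habs_le : ∀ a ∈ l, |a| ≤ M := by
    intro a ha
    rw [hMf]
    rcases (List.mem_cons.1 (hl ▸ ha)) with rfl | ha'
    · exact (PySem.List.le_foldl_max (t.map (fun y => |y|)) |a|).1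
    · exact (PySem.List.le_foldl_max (t.map (fun y => |y|)) |x|).2 _ (List.mem_map_of_mem ha')
  have hle_abs : ∀ b ∈ l, m0 ≤ |b| := by
    intro b hb
    rw [hmf]
    rcases (List.mem_cons.1 (hl ▸ hb)) with rfl | hb'
    · exact (PySem.List.foldl_min_le (t.map (fun y => |y|)) |b|).1
    · exact (PySem.List.foldl_min_le (t.map (fun y => |y|)) |x|).2 _ (List.mem_map_of_mem hb')
  -- M - m0 ∈ D and bounds every element of D
  have hMm0_mem : M - m0 ∈ D := by
    rcases hMmem with ⟨a, ha, hae⟩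
    rcases hmmem with ⟨b, hb, hbe⟩
    rw [hD]
    exact List.mem_flatMap.2 ⟨a, ha, List.mem_map.2 ⟨b, hb, by rw [hae, hbe]⟩⟩
  have hbound : ∀ z ∈ D, z ≤ M - m0 := by
    intro z hz
    rcases List.mem_flatMap.1 (hD ▸ hz) with ⟨a, ha, hz'⟩
    rcases List.mem_map.1 hz' with ⟨b, hb, rfl⟩
    have := habs_le a ha
    have := hle_abs b hb
    omega
  -- max? D id = some (M - m0)
  have hne : D ≠ [] := by intro h; rw [h] at hMm0_mem; exact absurd hMm0_mem (List.not_mem_nil)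
  cases hv : PySem.List.max? D (fun y => y) with
  | none => exact absurd ((PySem.List.max?_eq_none_iff D (fun y => y)).1 hv) hne
  | some v =>
    have hv_mem : v ∈ D := PySem.List.max?_mem hv
    have hv_max := PySem.List.max?_isMax hv
    have : v = M - m0 := le_antisymm (hbound v hv_mem) (hv_max _ hMm0_mem)
    rw [this]

-- ===== VERDICT (by name: the statement is the Claim_ definition above) =====
theorem get_bitDFT_spec : Claim_equal_get_bitDFT := by
  intro block threshold _ hpre
  rcases block with _ | ⟨x, t⟩
  · exact absurd rfl hpre
  · show get_bitDFT (x :: t) threshold = get_bitDFT_alt (x :: t) threshold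
    unfold get_bitDFT get_bitDFT_alt
    simp only [allDiffs_eq, max_flatMap, bfold_eq_max_min]
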